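-- pv_equiv track=rewrite | github.com/omoumane/backend_biblioscan | ai_services/app.py | _find_isbn
-- ===== SOURCE A (Python) =====
-- def _find_isbn(ids):
--     if not ids:
--         return None
--     isbn = None
--     for i in ids:
--         typ = i.get("type")
--         ident = i.get("identifier")
--         if typ == "ISBN_13" and ident:
--             return ident
--         if typ == "ISBN_10" and ident:
--             isbn = ident
--     return isbn
-- ===== SOURCE B (Python) =====
-- def _find_isbn(ids):
--     if not ids:
--         return None
--     isbn13 = next((i.get("identifier") for i in ids
--                    if i.get("type") == "ISBN_13" and i.get("identifier")), None)
--     if isbn13: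
--         return isbn13
--     tens = [i.get("identifier") for i in ids
--             if i.get("type") == "ISBN_10" and i.get("identifier")]
--     return tens[-1] if tens else None
-- ===== Notes on version B (the rewrite author's own statement) =====
-- stated objective: simpler
-- what changed: Replaced the single combined loop carrying an ISBN_10 accumulator with two purpose-specific passes: a first-match search for a truthy ISBN_13, then a comprehension collecting truthy ISBN_10s of which the last is returned.
import Mathlib
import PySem

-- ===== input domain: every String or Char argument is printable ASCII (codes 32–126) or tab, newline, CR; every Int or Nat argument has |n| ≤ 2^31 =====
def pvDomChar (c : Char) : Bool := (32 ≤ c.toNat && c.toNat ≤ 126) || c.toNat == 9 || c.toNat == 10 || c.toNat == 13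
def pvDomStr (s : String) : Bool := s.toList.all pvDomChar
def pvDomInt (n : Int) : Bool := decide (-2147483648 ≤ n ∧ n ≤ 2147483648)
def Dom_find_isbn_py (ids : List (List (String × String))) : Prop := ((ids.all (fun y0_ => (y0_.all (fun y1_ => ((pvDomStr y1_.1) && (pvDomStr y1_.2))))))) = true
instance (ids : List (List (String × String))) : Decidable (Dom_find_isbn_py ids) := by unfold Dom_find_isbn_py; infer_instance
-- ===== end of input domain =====

-- B replaces A's single combined loop (with an ISBN_10 accumulator) by two purpose-specific
-- passes: first-match ISBN_13, otherwise last truthy ISBN_10; objective: simpler.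

-- ===== PORT A =====
-- dict.get(k): first matching key of the association list, None if absent
def pvGetA (d : List (String × String)) (k : String) : Option String :=
  (d.find? (fun p => p.1 == k)).map (fun p => p.2)

-- Python truthiness of the Optional[str] `ident`
def pvTruthyA (o : Option String) : Bool :=
  match o with
  | none => false
  | some s => !(s == "")

-- the for-loop of A, carrying the `isbn` accumulator
def pvLoopA (ids : List (List (String × String))) (isbn : Option String) : Option String :=
  match ids with
  | [] => isbn
  | i :: rest =>
    let typ := pvGetA i "type"
    let ident := pvGetA i "identifier"
    if typ == some "ISBN_13" && pvTruthyA ident then ident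
    else if typ == some "ISBN_10" && pvTruthyA ident then pvLoopA rest ident
    else pvLoopA rest isbn

def find_isbn_py (ids : List (List (String × String))) : Option String :=
  if ids = [] then none
  else pvLoopA ids none

-- ===== PORT B =====
def pvGetB (d : List (String × String)) (k : String) : Option String :=
  (d.find? (fun p => p.1 == k)).map (fun p => p.2)

def pvTruthyB (o : Option String) : Bool :=
  match o with
  | none => false
  | some s => !(s == "")

def find_isbn_py_alt (ids : List (List (String × String))) : Option String :=
  if ids = [] then none
  else
    -- next((i.get("identifier") for i in ids if i.get("type") == "ISBN_13" and i.get("identifier")), None)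
    let isbn13 : Option String :=
      ids.findSome? (fun i =>
        if pvGetB i "type" == some "ISBN_13" && pvTruthyB (pvGetB i "identifier")
        then pvGetB i "identifier" else none)
    if pvTruthyB isbn13 then isbn13
    else
      -- [i.get("identifier") for i in ids if i.get("type") == "ISBN_10" and i.get("identifier")]
      let tens : List (Option String) :=
        (ids.filter (fun i =>
          pvGetB i "type" == some "ISBN_10" && pvTruthyB (pvGetB i "identifier"))).map
          (fun i => pvGetB i "identifier")
      -- tens[-1] if tens else None
      match tens.getLast? with
      | some v => v
      | none => none

-- ===== PRECONDITION & SPEC =====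
def Spec_find_isbn_py (ids : List (List (String × String))) (out : Option String) : Prop := out = find_isbn_py_alt ids
instance (ids : List (List (String × String))) (out : Option String) : Decidable (Spec_find_isbn_py ids out) := by unfold Spec_find_isbn_py; infer_instance

-- ===== CLAIM (what is proved, stated in full; the proofs are below) =====
def Claim_equal_find_isbn_py : Prop := ∀ (ids : List (List (String × String))), Dom_find_isbn_py ids → Spec_find_isbn_py ids (find_isbn_py ids)

-- ===== LEMMAS AND PROOFS =====

-- B's first pass as a named function (definitional unfolding of find_isbn_py_alt's `let`)
def pvFirst13 (ids : List (List (String × String))) : Option String :=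
  ids.findSome? (fun i =>
    if pvGetB i "type" == some "ISBN_13" && pvTruthyB (pvGetB i "identifier")
    then pvGetB i "identifier" else none)

def pvLast10 (ids : List (List (String × String))) : Option (Option String) :=
  ((ids.filter (fun i =>
      pvGetB i "type" == some "ISBN_10" && pvTruthyB (pvGetB i "identifier"))).map
      (fun i => pvGetB i "identifier")).getLast?

-- the first pass only produces truthy values
theorem pvFirst13_truthy (ids : List (List (String × String))) :
    pvTruthyB (pvFirst13 ids) = (pvFirst13 ids).isSome := by
  induction ids with
  | nil => rfl
  | cons i rest ih =>
    simp only [pvFirst13, List.findSome?_cons] at *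
    split
    · rename_i v hv
      split at hv
      · rename_i hc
        simp only [Bool.and_eq_true] at hc
        cases hg : pvGetB i "identifier" with
        | none => rw [hg] at hc; simp [pvTruthyB] at hc
        | some s =>
          rw [hg] at hv hc
          cases hv
          exact hc.2.symm ▸ rfl
      · simp at hv
    · exact ih

theorem pvLoopA_eq (ids : List (List (String × String))) (acc : Option String) :
    pvLoopA ids acc =
      match pvFirst13 ids with
      | some x => some x
      | none =>
        match pvLast10 ids with
        | some v => v
        | none => acc := by
  induction ids generalizing acc with
  | nil => simp [pvLoopA, pvFirst13, pvLast10]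
  | cons i rest ih =>
    simp only [pvLoopA, pvFirst13, pvLast10, List.findSome?_cons] at *
    by_cases h13 : (pvGetA i "type" == some "ISBN_13" && pvTruthyA (pvGetA i "identifier")) = true
    · have h13' : (pvGetB i "type" == some "ISBN_13" && pvTruthyB (pvGetB i "identifier")) = true := h13
      rw [if_pos h13, if_pos h13']
      simp only [Bool.and_eq_true] at h13
      cases hg : pvGetA i "identifier" with
      | none => rw [hg] at h13; simp [pvTruthyA] at h13
      | some s => simp [show pvGetB i "identifier" = some s from hg]
    · have h13' : ¬ (pvGetB i "type" == some "ISBN_13" && pvTruthyB (pvGetB i "identifier")) = true := h13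
      rw [if_neg h13, if_neg h13']
      by_cases h10 : (pvGetA i "type" == some "ISBN_10" && pvTruthyA (pvGetA i "identifier")) = true
      · have h10' : (pvGetB i "type" == some "ISBN_10" && pvTruthyB (pvGetB i "identifier")) = true := h10
        rw [if_pos h10]
        rw [ih]
        simp only [List.filter_cons, if_pos h10', List.map_cons]
        rcases hrest : pvFirst13 rest with _ | x
        · simp only [pvFirst13] at hrest
          rw [hrest]
          rcases hl : pvLast10 rest with _ | v
          · simp only [pvLast10] at hl
            rw [List.getLast?_cons, hl]; rfl
          · simp only [pvLast10] at hl
            rw [List.getLast?_cons, hl]; rfl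
        · simp only [pvFirst13] at hrest; rw [hrest]
      · have h10' : ¬ (pvGetB i "type" == some "ISBN_10" && pvTruthyB (pvGetB i "identifier")) = true := h10
        rw [if_neg h10, ih]
        simp only [List.filter_cons, if_neg h10']

-- ===== VERDICT (by name: the statement is the Claim_ definition above) =====
theorem find_isbn_py_spec : Claim_equal_find_isbn_py := by
  intro ids _
  unfold Spec_find_isbn_py find_isbn_py find_isbn_py_alt
  by_cases h : ids = []
  · simp [h]
  · rw [if_neg h, if_neg h]
    rw [pvLoopA_eq ids none]
    show _ = (if pvTruthyB (pvFirst13 ids) then pvFirst13 ids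
              else match pvLast10 ids with | some v => v | none => none)
    rw [pvFirst13_truthy]
    rcases h13 : pvFirst13 ids with _ | x
    · simp
    · simp
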